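-- pv_equiv track=rewrite | github.com/mapogalmagi/Coding-Test-Practice | 프로그래머스/2/17687. ［3차］ n진수 게임/［3차］ n진수 게임.py | p_decimal
-- ===== SOURCE A (Python) =====
-- def p_decimal(n, t, m, p):
--     num = 1; string = '0'
--     num_dic = {10:'A', 11:'B', 12:'C', 13:'D', 14:'E', 15:'F'}
--
--     while len(string) < m*t + p + 2:
--         # 밖의 진짜 나눠야 하는 값은 stay, number로 진법 계산
--         number = num
--         mid = ''
--         while number > 0:
--             if number % n >= 10:
--                 mid += num_dic[number % n]
--             else:
--                 mid += str(number % n)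
--             number //= n
--
--         num += 1
--         string += mid[::-1]
--
--     return string
-- ===== SOURCE B (Python) =====
-- DIGITS = '0123456789ABCDEF'
--
--
-- def _conv(x, n):
--     if x == 0:
--         return ''
--     return _conv(x // n, n) + DIGITS[x % n]
--
--
-- def p_decimal(n, t, m, p):
--     target = m * t + p + 2
--     parts = ['0']
--     total = 1
--     num = 1
--     while total < target:
--         s = _conv(num, n)
--         parts.append(s)
--         total += len(s)
--         num += 1
--     return ''.join(parts)
-- ===== Notes on version B (the rewrite author's own statement) =====
-- stated objective: simpler
-- what changed: Replaces the iterative build-LSB-first-then-reverse inner conversion and per-iteration string '+=' with a recursive base-n helper emitting digits most-significant-first via a digit table, accumulating string pieces in a list joined once at the end.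
-- outside the precondition, e.g. on p_decimal(-2, 1, 1, 1): A returns '01-0', B returns '0FFF0'; on p_decimal(1, 2, 2, 2): A does not finish within the time limit, B raises RecursionError; on p_decimal(0, 1, 1, 1): A raises ZeroDivisionError, B raises ZeroDivisionError
import Mathlib
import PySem

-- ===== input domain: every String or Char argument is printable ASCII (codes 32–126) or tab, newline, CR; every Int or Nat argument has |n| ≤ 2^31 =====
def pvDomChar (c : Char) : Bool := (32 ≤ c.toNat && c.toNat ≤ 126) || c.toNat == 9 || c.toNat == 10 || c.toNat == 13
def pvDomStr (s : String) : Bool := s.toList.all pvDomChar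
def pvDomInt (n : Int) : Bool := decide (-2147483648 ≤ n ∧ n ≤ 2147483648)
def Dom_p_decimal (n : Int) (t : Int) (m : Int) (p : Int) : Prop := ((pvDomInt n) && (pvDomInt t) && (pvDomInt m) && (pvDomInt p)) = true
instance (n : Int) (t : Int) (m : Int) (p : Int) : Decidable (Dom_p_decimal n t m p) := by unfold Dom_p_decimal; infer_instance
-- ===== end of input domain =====

-- B replaces A's build-LSB-first-then-reverse inner loop and string '+=' accumulation by a
-- recursive most-significant-first base-n conversion over a digit table, joining a list of
-- pieces once at the end (objective: simpler).


-- ===== PORT A =====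
-- num_dic[d] for d ≥ 10, str(d) otherwise; the dict lookup is PySem.Dict.get? (KeyError = none,
-- excluded by Pre_; [] stands for the raised case and is never reached inside Pre_).
def pvDigitA (d : Int) : List Char :=
  if d ≥ 10 then
    ((PySem.Dict.ofList [((10:Int),'A'),(11,'B'),(12,'C'),(13,'D'),(14,'E'),(15,'F')]).get? d).elim [] (fun c => [c])
  else PySem.Int.toChars d

-- inner 'while number > 0' loop; fuel number.toNat suffices since number strictly decreases for n ≥ 2
def pvInnerA : Nat → Int → Int → List Char → List Char
  | 0, _, _, mid => mid
  | f+1, number, n, mid =>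
    if number > 0 then
      pvInnerA f (PySem.Int.floordiv number n) n (mid ++ pvDigitA (PySem.Int.mod number n))
    else mid

-- outer 'while len(string) < target' loop; mid[::-1] is .reverse (PySem.List.slice?_none_none_neg_one);
-- fuel target.toNat suffices since each iteration appends at least one character.
-- A CPython str carries its length (len is O(1)) and 'string +=' appends in place, so the port
-- carries the accumulated string as (its length slen, its characters sRev in reverse order):
-- appending mid[::-1] is prepending its reversal, and the final string is sRev.reverse.
def pvOuterA : Nat → Int → Int → Int → Int → List Char → List Char
  | 0, _, _, _, _, sRev => sRev
  | f+1, n, target, num, slen, sRev =>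
    if slen < target then
      pvOuterA f n target (num+1) (slen + ((pvInnerA num.toNat num n []).reverse).length)
        (((pvInnerA num.toNat num n []).reverse).reverse ++ sRev)
    else sRev

def p_decimal (n : Int) (t : Int) (m : Int) (p : Int) : String :=
  String.ofList ((pvOuterA (m*t + p + 2).toNat n (m*t + p + 2) 1 1 ['0']).reverse)

-- ===== PORT B =====
-- DIGITS = '0123456789ABCDEF'
def pvDIGITS : List Char := ['0','1','2','3','4','5','6','7','8','9','A','B','C','D','E','F']

-- DIGITS[x % n] (IndexError = none, excluded by Pre_; [] stands for the raised case)
def pvDigitB (n x : Int) : List Char :=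
  (PySem.List.pyGet? pvDIGITS (PySem.Int.mod x n)).elim [] (fun c => [c])

-- _conv(x, n): '' if x == 0 else _conv(x // n, n) + DIGITS[x % n]; fuel x.toNat suffices for n ≥ 2
def pvConvB : Nat → Int → Int → List Char
  | 0, _, _ => []
  | f+1, x, n =>
    if x = 0 then []
    else pvConvB f (PySem.Int.floordiv x n) n ++ pvDigitB n x

-- the 'while total < target' loop accumulating the list of pieces; list.append is O(1) in
-- CPython, so the port prepends and reverses the parts list once at the end
def pvLoopB : Nat → Int → Int → Int → Int → List (List Char) → List (List Char)
  | 0, _, _, _, _, partsRev => partsRev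
  | f+1, n, target, num, total, partsRev =>
    if total < target then
      pvLoopB f n target (num+1) (total + (pvConvB num.toNat num n).length) (pvConvB num.toNat num n :: partsRev)
    else partsRev

-- ''.join(parts)
def p_decimal_alt (n : Int) (t : Int) (m : Int) (p : Int) : String :=
  String.ofList ((pvLoopB (m*t + p + 2).toNat n (m*t + p + 2) 1 1 [['0']]).reverse).flatten

-- ===== PRECONDITION & SPEC =====
-- Pre_ admits exactly the inputs where A returns normally except one returning region it excludes:
-- negative bases n ≤ -1 with target ≥ 2, where A's result strings are accidental renderings of
-- sign-carrying '%'-remainders (e.g. '-1') that no specification would pick and B's digit-table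
-- rendering is equally arbitrary. Also outside Pre_: n = 0 (ZeroDivisionError), n = 1 (divergence)
-- when target ≥ 2, and n ≥ 17 with target ≥ 17 (KeyError at num = 16).
def Pre_p_decimal (n : Int) (t : Int) (m : Int) (p : Int) : Prop :=
  m*t + p + 2 ≤ 1 ∨ (2 ≤ n ∧ n ≤ 16) ∨ (17 ≤ n ∧ m*t + p + 2 ≤ 16)
instance (n : Int) (t : Int) (m : Int) (p : Int) : Decidable (Pre_p_decimal n t m p) := by
  unfold Pre_p_decimal; infer_instance

def pvWitness_p_decimal : Int × Int × Int × Int := (16, 1, 1, 1)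

def Spec_p_decimal (n : Int) (t : Int) (m : Int) (p : Int) (out : String) : Prop := out = p_decimal_alt n t m p
instance (n : Int) (t : Int) (m : Int) (p : Int) (out : String) : Decidable (Spec_p_decimal n t m p out) := by
  unfold Spec_p_decimal; infer_instance

-- ===== CLAIM (what is proved, stated in full; the proofs are below) =====
def Claim_equal_p_decimal : Prop := ∀ (n : Int) (t : Int) (m : Int) (p : Int), Dom_p_decimal n t m p → Pre_p_decimal n t m p → Spec_p_decimal n t m p (p_decimal n t m p)

-- ===== LEMMAS AND PROOFS =====

-- the two digit renderings agree on 0..15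
lemma pvDigit_eq {d : Int} (h0 : 0 ≤ d) (h15 : d ≤ 15) :
    pvDigitA d = (PySem.List.pyGet? pvDIGITS d).elim [] (fun c => [c]) := by
  interval_cases d <;> decide

-- each table digit is a single character on 0..15
lemma pvGetElim_len {d : Int} (h0 : 0 ≤ d) (h15 : d ≤ 15) :
    ((PySem.List.pyGet? pvDIGITS d).elim [] (fun c => ([c] : List Char))).length = 1 := by
  interval_cases d <;> decide

lemma pvConvB_zero (g : Nat) (n : Int) : pvConvB g 0 n = [] := by
  cases g <;> simp [pvConvB]

-- reversing A's LSB-first accumulation yields B's MSB-first recursion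
lemma pvInner_conv (f : Nat) : ∀ (g : Nat) (number n : Int) (mid : List Char),
    2 ≤ n → (n ≤ 16 ∨ number ≤ 15) → 0 ≤ number → number.toNat ≤ f → number.toNat ≤ g →
    pvInnerA f number n mid = mid ++ (pvConvB g number n).reverse := by
  induction f with
  | zero =>
    intro g number n mid _ _ h0 hf _
    have : number = 0 := by omega
    subst this
    simp [pvInnerA, pvConvB_zero]
  | succ f ih =>
    intro g number n mid hn2 hd h0 hf hg
    by_cases hpos : number > 0
    · have hne : ¬ number = 0 := by omega
      have hn0 : (0:Int) < n := by omega
      obtain ⟨g', rfl⟩ : ∃ g', g = g' + 1 := ⟨g - 1, by omega⟩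
      set q := PySem.Int.floordiv number n with hqdef
      have hq0 : 0 ≤ q := (PySem.Int.le_floordiv_iff_mul_le hn0).mpr (by nlinarith)
      have hqlt : q < number := (PySem.Int.floordiv_lt_iff_lt_mul hn0).mpr (by nlinarith)
      set d := PySem.Int.mod number n with hddef
      have hd0 : 0 ≤ d := PySem.Int.mod_nonneg number hn0
      have hdlt : d < n := PySem.Int.mod_lt number hn0
      have hd15 : d ≤ 15 := by
        by_cases hn16 : n ≤ 16
        · omega
        · have hnum15 : number ≤ 15 := by
            rcases hd with h | h
            · omega
            · exact h
          have : d = number := by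
            rw [hddef, PySem.Int.mod_eq_emod_of_pos hn0, Int.emod_eq_of_lt h0 (by omega)]
          omega
      simp only [pvInnerA, if_pos hpos, pvConvB, if_neg hne]
      rw [ih g' q n (mid ++ pvDigitA d) hn2 (hd.imp id fun h => by omega) hq0 (by omega) (by omega)]
      have heq : pvDigitB n number = pvDigitA d := by
        simp only [pvDigitB]
        rw [← hddef, pvDigit_eq hd0 hd15]
      have hlen : (pvDigitA d).length = 1 := by
        rw [pvDigit_eq hd0 hd15]; exact pvGetElim_len hd0 hd15
      obtain ⟨c, hc⟩ := List.length_eq_one_iff.mp hlen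
      rw [heq, hc]
      simp [List.reverse_append, ← hqdef]
    · have : number = 0 := by omega
      subst this
      simp [pvInnerA, pvConvB_zero]

-- a single-digit number converts to one character when the base exceeds it
lemma pvConv_single (g : Nat) (x n : Int) (h17 : 17 ≤ n) (hx1 : 1 ≤ x) (hx15 : x ≤ 15)
    (hg : x.toNat ≤ g) : (pvConvB g x n).length = 1 := by
  obtain ⟨g', rfl⟩ : ∃ g', g = g' + 1 := ⟨g - 1, by omega⟩
  have hn0 : (0:Int) < n := by omega
  have hq : PySem.Int.floordiv x n = 0 :=
    (PySem.Int.floordiv_eq_iff_of_pos hn0).mpr (by constructor <;> nlinarith)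
  have hm : PySem.Int.mod x n = x := by
    rw [PySem.Int.mod_eq_emod_of_pos hn0, Int.emod_eq_of_lt (by omega) (by omega)]
  simp only [pvConvB, if_neg (show ¬ x = 0 by omega), hq, pvConvB_zero, List.nil_append,
    pvDigitB, hm]
  exact pvGetElim_len (by omega) hx15

-- loop correspondence: the joined (reversed) parts list tracks A's (reversed) string,
-- total its length
lemma pvOuter_eq (f : Nat) : ∀ (n target num total slen : Int) (sRev : List Char)
    (partsRev : List (List Char)),
    2 ≤ n → (n ≤ 16 ∨ (17 ≤ n ∧ target ≤ 16 ∧ total = num)) → 1 ≤ num →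
    (partsRev.reverse).flatten = sRev.reverse → total = slen → slen = (sRev.length : Int) →
    (pvOuterA f n target num slen sRev).reverse
      = ((pvLoopB f n target num total partsRev).reverse).flatten := by
  induction f with
  | zero =>
    intro n target num total slen sRev partsRev _ _ _ hflat _ _
    simpa [pvOuterA, pvLoopB] using hflat.symm
  | succ f ih =>
    intro n target num total slen sRev partsRev hn2 hcase hnum hflat htot hlen
    by_cases hc : total < target
    · have hc' : slen < target := by omega
      have hconv : (pvInnerA num.toNat num n []).reverse = pvConvB num.toNat num n := by
        rw [pvInner_conv num.toNat num.toNat num n [] hn2 ?_ (by omega) le_rfl le_rfl]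
        · simp
        · rcases hcase with h | ⟨h17, ht16, hteq⟩
          · exact Or.inl h
          · exact Or.inr (by omega)
      simp only [pvOuterA, if_pos hc', pvLoopB, if_pos hc, hconv]
      apply ih
      · exact hn2
      · rcases hcase with h | ⟨h17, ht16, hteq⟩
        · exact Or.inl h
        · refine Or.inr ⟨h17, ht16, ?_⟩
          have hone : (pvConvB num.toNat num n).length = 1 :=
            pvConv_single _ num n h17 (by omega) (by omega) le_rfl
          omega
      · omega
      · simp [hflat]
      · omega
      · simp only [List.length_append, List.length_reverse]
        push_cast
        omega
    · have hc' : ¬ (slen < target) := by omega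
      simp only [pvOuterA, if_neg hc', pvLoopB, if_neg hc]
      exact hflat.symm

-- ===== VERDICT (by name: the statement is the Claim_ definition above) =====
theorem p_decimal_spec : Claim_equal_p_decimal := by
  intro n t m p _ hpre
  show p_decimal n t m p = p_decimal_alt n t m p
  unfold p_decimal p_decimal_alt
  rcases hpre with h1 | ⟨hn2, hn16⟩ | ⟨h17, ht16⟩
  · have h2 : (m*t + p + 2).toNat = 0 ∨ (m*t + p + 2).toNat = 1 := by omega
    rcases h2 with h | h <;>
      simp [h, pvOuterA, pvLoopB, if_neg (show ¬ ((1:Int) < m*t + p + 2) by omega)]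
  · exact congrArg _ (pvOuter_eq _ n _ 1 1 1 ['0'] [['0']] hn2 (Or.inl hn16) le_rfl rfl rfl rfl)
  · exact congrArg _ (pvOuter_eq _ n _ 1 1 1 ['0'] [['0']] (by omega)
      (Or.inr ⟨h17, ht16, rfl⟩) le_rfl rfl rfl rfl)
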